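-- pv_equiv track=rewrite | github.com/cameronaaron/accrescent-checker | accrescent.py | diff_apps
-- ===== SOURCE A (Python) =====
-- from typing import Any, Dict, List, Tuple, Optional
--
-- def diff_apps(
--     old: Dict[str, Dict[str, Any]],
--     new: Dict[str, Dict[str, Any]],
-- ) -> Tuple[List[str], List[str], List[str], List[str]]:
--     """Compare old and new app states, return sorted lists of changes."""
--     added = sorted(set(new) - set(old))
--     removed = sorted(set(old) - set(new))
--
--     updated: List[str] = []
--     cert_changed: List[str] = []
--
--     for pkg in sorted(set(old) & set(new)):
--         o, n = old[pkg], new[pkg]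
--         if o.get("min_version_code") != n.get("min_version_code"):
--             updated.append(pkg)
--         if set(o.get("signing_cert_hashes", [])) != set(n.get("signing_cert_hashes", [])):
--             cert_changed.append(pkg)
--     return added, removed, updated, cert_changed
-- ===== SOURCE B (Python) =====
-- def diff_apps(old, new):
--     """Sort both key lists once, then classify with a two-pointer merge; outputs come out already sorted."""
--     ok = sorted(old)
--     nk = sorted(new)
--     added, removed, updated, cert_changed = [], [], [], []
--     i = j = 0
--     while i < len(ok) and j < len(nk):
--         if ok[i] < nk[j]:
--             removed.append(ok[i])
--             i += 1
--         elif nk[j] < ok[i]: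
--             added.append(nk[j])
--             j += 1
--         else:
--             pkg = ok[i]
--             o, n = old[pkg], new[pkg]
--             if o.get("min_version_code") != n.get("min_version_code"):
--                 updated.append(pkg)
--             if set(o.get("signing_cert_hashes", [])) != set(n.get("signing_cert_hashes", [])):
--                 cert_changed.append(pkg)
--             i += 1
--             j += 1
--     removed.extend(ok[i:])
--     added.extend(nk[j:])
--     return added, removed, updated, cert_changed
-- ===== Notes on version B (the rewrite author's own statement) =====
-- stated objective: alternative
-- what changed: Replaces A's three set operations (two set differences and a sorted-intersection loop) with sorting the two key lists once and classifying every key in a single two-pointer merge, whose four output lists come out already sorted with no final sort or set construction.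
import Mathlib
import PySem

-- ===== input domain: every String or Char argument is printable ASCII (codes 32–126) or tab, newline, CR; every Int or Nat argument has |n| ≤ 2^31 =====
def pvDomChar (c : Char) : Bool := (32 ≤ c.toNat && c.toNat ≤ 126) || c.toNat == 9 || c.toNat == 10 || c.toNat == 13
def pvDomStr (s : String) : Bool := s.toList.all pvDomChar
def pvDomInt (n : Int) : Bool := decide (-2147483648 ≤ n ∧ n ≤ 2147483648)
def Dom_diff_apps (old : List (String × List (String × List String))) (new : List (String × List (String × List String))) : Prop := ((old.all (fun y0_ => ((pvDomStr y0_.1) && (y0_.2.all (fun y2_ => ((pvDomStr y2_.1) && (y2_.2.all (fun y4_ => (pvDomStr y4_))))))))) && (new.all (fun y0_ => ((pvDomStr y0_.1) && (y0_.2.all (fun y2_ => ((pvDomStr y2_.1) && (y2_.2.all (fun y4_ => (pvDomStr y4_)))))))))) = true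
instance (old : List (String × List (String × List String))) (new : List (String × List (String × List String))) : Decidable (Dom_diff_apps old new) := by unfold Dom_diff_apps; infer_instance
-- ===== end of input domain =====

-- B replaces A's three set operations plus intersection loop by sorting the two key
-- lists once and classifying with a two-pointer merge, so the outputs come out already
-- sorted (objective: alternative algorithm, same cost).

-- ===== PORT A =====
-- shared field comparison (identical code in both Pythons): o.get("min_version_code") != n.get("min_version_code")
def pvChangedVer (oldD newD : PySem.Dict String (List (String × List String))) (pkg : String) : Bool :=
  let o : PySem.Dict String (List String) := PySem.Dict.ofList ((oldD.get? pkg).getD [])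
  let n : PySem.Dict String (List String) := PySem.Dict.ofList ((newD.get? pkg).getD [])
  decide (o.get? "min_version_code" ≠ n.get? "min_version_code")

-- shared field comparison: set(o.get("signing_cert_hashes", [])) != set(n.get(...))
def pvChangedCert (oldD newD : PySem.Dict String (List (String × List String))) (pkg : String) : Bool :=
  let o : PySem.Dict String (List String) := PySem.Dict.ofList ((oldD.get? pkg).getD [])
  let n : PySem.Dict String (List String) := PySem.Dict.ofList ((newD.get? pkg).getD [])
  !(PySem.Set.equal (PySem.Set.ofList (o.getD "signing_cert_hashes" []))
                    (PySem.Set.ofList (n.getD "signing_cert_hashes" [])))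

-- one iteration of A's loop over sorted(set(old) & set(new)) (two independent ifs, two accumulators)
def pvStepA (oldD newD : PySem.Dict String (List (String × List String)))
    (acc : List String × List String) (pkg : String) : List String × List String :=
  ((if pvChangedVer oldD newD pkg then acc.1 ++ [pkg] else acc.1),
   (if pvChangedCert oldD newD pkg then acc.2 ++ [pkg] else acc.2))

-- old[pkg] is ported as (get? pkg).getD [] — total form; pkg always comes from the key intersection, so the default is never taken
def diff_apps (old : List (String × List (String × List String))) (new : List (String × List (String × List String))) : List String × List String × List String × List String :=
  let oldD := PySem.Dict.ofList old
  let newD := PySem.Dict.ofList new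
  let added := PySem.List.sorted (PySem.Set.diff (PySem.Set.ofList newD.keys) (PySem.Set.ofList oldD.keys)) (fun x => x) false
  let removed := PySem.List.sorted (PySem.Set.diff (PySem.Set.ofList oldD.keys) (PySem.Set.ofList newD.keys)) (fun x => x) false
  let uc := (PySem.List.sorted (PySem.Set.inter (PySem.Set.ofList oldD.keys) (PySem.Set.ofList newD.keys)) (fun x => x) false).foldl (pvStepA oldD newD) ([], [])
  (added, removed, uc.1, uc.2)

-- ===== PORT B =====
-- the two-pointer merge loop of B: walks the two sorted key lists, classifying each key
def pvMerge (oldD newD : PySem.Dict String (List (String × List String))) :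
    List String → List String → List String × List String × List String × List String
  | [], ys => (ys, [], [], [])                    -- added.extend(nk[j:])
  | x :: xs, [] => ([], x :: xs, [], [])          -- removed.extend(ok[i:])
  | x :: xs, y :: ys =>
    if x < y then
      let r := pvMerge oldD newD xs (y :: ys)
      (r.1, x :: r.2.1, r.2.2.1, r.2.2.2)
    else if y < x then
      let r := pvMerge oldD newD (x :: xs) ys
      (y :: r.1, r.2.1, r.2.2.1, r.2.2.2)
    else
      let r := pvMerge oldD newD xs ys
      (r.1, r.2.1,
       (if pvChangedVer oldD newD x then x :: r.2.2.1 else r.2.2.1),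
       (if pvChangedCert oldD newD x then x :: r.2.2.2 else r.2.2.2))
  termination_by xs ys => xs.length + ys.length

def diff_apps_alt (old : List (String × List (String × List String))) (new : List (String × List (String × List String))) : List String × List String × List String × List String :=
  let oldD := PySem.Dict.ofList old
  let newD := PySem.Dict.ofList new
  let ok := PySem.List.sorted oldD.keys (fun x => x) false
  let nk := PySem.List.sorted newD.keys (fun x => x) false
  pvMerge oldD newD ok nk

-- ===== PRECONDITION & SPEC =====
def Spec_diff_apps (old : List (String × List (String × List String))) (new : List (String × List (String × List String))) (out : List String × List String × List String × List String) : Prop := out = diff_apps_alt old new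
instance (old : List (String × List (String × List String))) (new : List (String × List (String × List String))) (out : List String × List String × List String × List String) : Decidable (Spec_diff_apps old new out) := by unfold Spec_diff_apps; infer_instance

-- ===== CLAIM (what is proved, stated in full; the proofs are below) =====
def Claim_equal_diff_apps : Prop := ∀ (old : List (String × List (String × List String))) (new : List (String × List (String × List String))), Dom_diff_apps old new → Spec_diff_apps old new (diff_apps old new)

-- ===== LEMMAS AND PROOFS =====

lemma foldA_eq (oldD newD : PySem.Dict String (List (String × List String)))
    (l : List String) (a b : List String) :
    l.foldl (pvStepA oldD newD) (a, b)
      = (a ++ l.filter (pvChangedVer oldD newD), b ++ l.filter (pvChangedCert oldD newD)) := by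
  induction l generalizing a b with
  | nil => simp
  | cons k l ih =>
    simp only [List.foldl_cons, pvStepA, List.filter_cons]
    cases hP : pvChangedVer oldD newD k <;> cases hQ : pvChangedCert oldD newD k <;>
      simp [ih]

-- sorting a nodup list gives a strictly increasing list
lemma sorted_pairwise_lt (I : List String) (hnd : I.Nodup) :
    (PySem.List.sorted I (fun x => x) false).Pairwise (fun a b => a < b) := by
  have hperm : (PySem.List.sorted I (fun x => x) false).Perm I := PySem.List.sorted_perm I _ _
  have hle : (PySem.List.sorted I (fun x => x) false).Pairwise (fun a b => a ≤ b) :=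
    PySem.List.sorted_pairwise I (fun x => x)
  have hnd' : (PySem.List.sorted I (fun x => x) false).Nodup := hperm.nodup_iff.mpr hnd
  exact (hle.and hnd').imp (fun h => lt_of_le_of_ne h.1 h.2)

-- sorting the filter of a nodup list = filtering its sort
lemma sorted_filter_comm (I : List String) (hnd : I.Nodup) (P : String → Bool) :
    PySem.List.sorted (I.filter P) (fun x => x) false
      = (PySem.List.sorted I (fun x => x) false).filter P := by
  have hperm : (PySem.List.sorted I (fun x => x) false).Perm I := PySem.List.sorted_perm I _ _
  exact PySem.List.sorted_eq_of_perm_of_pairwise_lt _ _ _ (hperm.filter P)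
    ((sorted_pairwise_lt I hnd).filter P)

-- sorting preserves the boolean membership test
lemma contains_sorted (I : List String) (z : String) :
    (PySem.List.sorted I (fun x => x) false).contains z = I.contains z := by
  by_cases h : z ∈ I <;> simp [h, PySem.List.mem_sorted]

-- characterization of the merge loop on strictly increasing inputs
lemma merge_eq (oldD newD : PySem.Dict String (List (String × List String)))
    (xs ys : List String) (hx : xs.Pairwise (· < ·)) (hy : ys.Pairwise (· < ·)) :
    pvMerge oldD newD xs ys
      = (ys.filter (fun k => !(xs.contains k)),
         xs.filter (fun k => !(ys.contains k)),
         (xs.filter (fun k => ys.contains k)).filter (pvChangedVer oldD newD),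
         (xs.filter (fun k => ys.contains k)).filter (pvChangedCert oldD newD)) := by
  fun_induction pvMerge oldD newD xs ys with
  | case1 ys => simp
  | case2 x xs => simp
  | case3 x xs y ys hlt r ih =>
    have hx' := hx.of_cons
    have hhd : ∀ z ∈ y :: ys, x < z := by
      intro z hz
      rcases List.mem_cons.mp hz with rfl | hz
      · exact hlt
      · exact lt_trans hlt (List.rel_of_pairwise_cons hy hz)
    have h1 : (y :: ys).filter (fun k => !((x :: xs).contains k))
        = (y :: ys).filter (fun k => !(xs.contains k)) := by
      apply List.filter_congr
      intro z hz
      have : z ≠ x := fun h => absurd (h ▸ hhd z hz) (lt_irrefl z)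
      simp [this]
    have hxnot : x ∉ y :: ys := fun h => absurd (hhd x h) (lt_irrefl x)
    have hxc : ((y :: ys).contains x) = false := by simpa using hxnot
    rw [show r = pvMerge oldD newD xs (y :: ys) from rfl, ih hx' hy, h1]
    simp only [List.filter_cons, hxc, Bool.not_false, if_true, if_false, Bool.false_eq_true]
  | case4 x xs y ys hlt hgt r ih =>
    have hy' := hy.of_cons
    have hhd : ∀ z ∈ x :: xs, y < z := by
      intro z hz
      rcases List.mem_cons.mp hz with rfl | hz
      · exact hgt
      · exact lt_trans hgt (List.rel_of_pairwise_cons hx hz)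
    have h2 : ∀ P : Bool → Bool,
        List.filter (fun k => P ((y :: ys).contains k)) (x :: xs)
          = List.filter (fun k => P (ys.contains k)) (x :: xs) := by
      intro P
      apply List.filter_congr
      intro z hz
      have : z ≠ y := fun h => absurd (h ▸ hhd z hz) (lt_irrefl z)
      simp [this]
    have hynot : y ∉ x :: xs := fun h => absurd (hhd y h) (lt_irrefl y)
    have hyc : ((x :: xs).contains y) = false := by simpa using hynot
    rw [show r = pvMerge oldD newD (x :: xs) ys from rfl, ih hx hy']
    have h2a := h2 (fun b => !b)
    have h2b := h2 (fun b => b)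
    simp only at h2a h2b
    rw [h2a, h2b]
    simp [List.filter_cons]
    simpa using hynot
  | case5 x xs y ys hlt hgt r ih =>
    have hxy : x = y := le_antisymm (not_lt.mp hgt) (not_lt.mp hlt)
    subst hxy
    have hx' := hx.of_cons
    have hy' := hy.of_cons
    have hne_ys : ∀ z ∈ ys, z ≠ x := fun z hz h =>
      absurd (h ▸ List.rel_of_pairwise_cons hy hz) (lt_irrefl x)
    have hne_xs : ∀ z ∈ xs, z ≠ x := fun z hz h =>
      absurd (h ▸ List.rel_of_pairwise_cons hx hz) (lt_irrefl x)
    have h1 : List.filter (fun k => !(x :: xs).contains k) (x :: ys)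
        = List.filter (fun k => !xs.contains k) ys := by
      rw [List.filter_cons]
      have hc : (!(x :: xs).contains x) = false := by simp
      rw [hc]
      simp only [Bool.false_eq_true, if_false]
      exact List.filter_congr (fun z hz => by simp [hne_ys z hz])
    have h2 : List.filter (fun k => !(x :: ys).contains k) (x :: xs)
        = List.filter (fun k => !ys.contains k) xs := by
      rw [List.filter_cons]
      have hc : (!(x :: ys).contains x) = false := by simp
      rw [hc]
      simp only [Bool.false_eq_true, if_false]
      exact List.filter_congr (fun z hz => by simp [hne_xs z hz])
    have h3 : List.filter (fun k => (x :: ys).contains k) (x :: xs)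
        = x :: List.filter (fun k => ys.contains k) xs := by
      rw [List.filter_cons]
      have hc : ((x :: ys).contains x) = true := by simp
      rw [hc]
      simp only [if_true]
      congr 1
      exact List.filter_congr (fun z hz => by simp [hne_xs z hz])
    rw [show r = pvMerge oldD newD xs ys from rfl, ih hx' hy', h1, h2, h3,
        List.filter_cons, List.filter_cons]

theorem main_eq (old new : List (String × List (String × List String))) :
    diff_apps old new = diff_apps_alt old new := by
  simp only [diff_apps, diff_apps_alt]
  set oldD := PySem.Dict.ofList old with hOldD
  set newD := PySem.Dict.ofList new with hNewD
  have hndo : oldD.keys.Nodup := PySem.Dict.nodup_keys_ofList old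
  have hndn : newD.keys.Nodup := PySem.Dict.nodup_keys_ofList new
  have hKo : PySem.Set.ofList oldD.keys = oldD.keys := PySem.Set.ofList_eq_self_of_nodup _ hndo
  have hKn : PySem.Set.ofList newD.keys = newD.keys := PySem.Set.ofList_eq_self_of_nodup _ hndn
  rw [hKo, hKn]
  have hdiffNO : PySem.Set.diff newD.keys oldD.keys
      = newD.keys.filter (fun k => !(oldD.keys.contains k)) := rfl
  have hdiffON : PySem.Set.diff oldD.keys newD.keys
      = oldD.keys.filter (fun k => !(newD.keys.contains k)) := rfl
  have hinter : PySem.Set.inter oldD.keys newD.keys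
      = oldD.keys.filter (fun k => newD.keys.contains k) := rfl
  rw [hdiffNO, hdiffON, hinter,
      sorted_filter_comm _ hndn, sorted_filter_comm _ hndo, sorted_filter_comm _ hndo,
      foldA_eq,
      merge_eq oldD newD _ _ (sorted_pairwise_lt _ hndo) (sorted_pairwise_lt _ hndn)]
  refine congrArg₂ _ ?_ (congrArg₂ _ ?_ (congrArg₂ _ ?_ ?_))
  · exact List.filter_congr (fun z _ => by rw [contains_sorted])
  · exact List.filter_congr (fun z _ => by rw [contains_sorted])
  · rw [List.nil_append]
    exact congrArg _ (List.filter_congr (fun z _ => by rw [contains_sorted]))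
  · rw [List.nil_append]
    exact congrArg _ (List.filter_congr (fun z _ => by rw [contains_sorted]))

-- ===== VERDICT (by name: the statement is the Claim_ definition above) =====
theorem diff_apps_spec : Claim_equal_diff_apps := by
  intro old new _
  unfold Spec_diff_apps
  exact main_eq old new
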